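-- pv_equiv track=rewrite | github.com/biobinary/Tugas-3-KI | DES.py | encrypt_buffer
-- ===== SOURCE A (Python) =====
-- IP = [58,50,42,34,26,18,10,2,
--       60,52,44,36,28,20,12,4,
--       62,54,46,38,30,22,14,6,
--       64,56,48,40,32,24,16,8,
--       57,49,41,33,25,17,9,1,
--       59,51,43,35,27,19,11,3,
--       61,53,45,37,29,21,13,5,
--       63,55,47,39,31,23,15,7]
--
-- FP = [40,8,48,16,56,24,64,32,
--       39,7,47,15,55,23,63,31,
--       38,6,46,14,54,22,62,30,
--       37,5,45,13,53,21,61,29,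
--       36,4,44,12,52,20,60,28,
--       35,3,43,11,51,19,59,27,
--       34,2,42,10,50,18,58,26,
--       33,1,41,9,49,17,57,25]
--
-- def text_to_bits(text):
--     return ''.join(format(ord(c), '08b') for c in text)
--
-- def bits_to_text(bits):
--     return ''.join(chr(int(bits[i:i+8], 2)) for i in range(0, len(bits), 8))
--
-- def xor(a, b):
--     return ''.join('0' if i == j else '1' for i, j in zip(a, b))
--
-- def pad_text(text):
--     while len(text) % 8 != 0:
--         text += ' '
--     return text
--
-- def simple_round_func(block, key_bits):
--     return xor(block, key_bits[:len(block)])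
--
-- def des_encrypt_block(block_bits, key_bits):
--     block_bits = ''.join(block_bits[i-1] for i in IP)
--     left, right = block_bits[:32], block_bits[32:]
--     for _ in range(16):
--         new_right = xor(left, simple_round_func(right, key_bits))
--         left, right = right, new_right
--     pre_output = right + left
--     return ''.join(pre_output[i-1] for i in FP)
--
-- def encrypt_buffer(text, key):
--     text = pad_text(text)
--     key_bits = text_to_bits(pad_text(key)[:8])
--     ciphertext = ""
--     for i in range(0, len(text), 8):
--         block_bits = text_to_bits(text[i:i+8])
--         enc_bits = des_encrypt_block(block_bits, key_bits)
--         ciphertext += bits_to_text(enc_bits)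
--     return ciphertext
-- ===== SOURCE B (Python) =====
-- IP = [58,50,42,34,26,18,10,2,
--       60,52,44,36,28,20,12,4,
--       62,54,46,38,30,22,14,6,
--       64,56,48,40,32,24,16,8,
--       57,49,41,33,25,17,9,1,
--       59,51,43,35,27,19,11,3,
--       61,53,45,37,29,21,13,5,
--       63,55,47,39,31,23,15,7]
--
-- FP = [40,8,48,16,56,24,64,32,
--       39,7,47,15,55,23,63,31,
--       38,6,46,14,54,22,62,30,
--       37,5,45,13,53,21,61,29,
--       36,4,44,12,52,20,60,28,
--       35,3,43,11,51,19,59,27,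
--       34,2,42,10,50,18,58,26,
--       33,1,41,9,49,17,57,25]
--
-- def _char_bits(c):
--     return [(ord(c) >> (7 - b)) & 1 for b in range(8)]
--
-- def _pack(bits):
--     # bits -> chars, 8 bits per char, MSB first
--     if not bits:
--         return ""
--     v = 0
--     for b in bits[:8]:
--         v = 2 * v + b
--     return chr(v) + _pack(bits[8:])
--
-- # One precomputed table fusing IP, the collapsed Feistel network and FP.
-- # Over GF(2) the 16 identical rounds (round function = XOR with key) collapse:
-- # after IP with halves L0,R0, sixteen rounds leave left = R0 and
-- # right = L0 ^ R0 ^ k, so output bit j reads one or two input bits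
-- # (plus one key bit) directly through the composed permutations.
-- def _table():
--     tbl = []
--     for f in FP:
--         p = f - 1
--         if p < 32:
--             tbl.append((IP[p] - 1, (IP[p + 32] - 1, p)))
--         else:
--             tbl.append((IP[p] - 1, None))
--     return tbl
--
-- def encrypt_buffer(text, key):
--     text += ' ' * (-len(text) % 8)
--     key = (key + ' ' * (-len(key) % 8))[:8]
--     kbits = [b for c in key for b in _char_bits(c)]
--     tbl = _table()
--     out = []
--     while text:
--         block, text = text[:8], text[8:]
--         bits = [b for c in block for b in _char_bits(c)]
--         enc = [bits[i1] if rest is None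
--                else bits[i1] ^ bits[rest[0]] ^ kbits[rest[1]]
--                for (i1, rest) in tbl]
--         out.append(_pack(enc))
--     return ''.join(out)
-- ===== Notes on version B (the rewrite author's own statement) =====
-- stated objective: faster
-- what changed: B discards the '0'/'1'-bit-string machinery entirely: since the 16 identical XOR rounds collapse over GF(2) (right = L0^R0^k, left = R0), the IP -> network -> FP composition is fused into one precomputed 64-entry index table, and each block is encrypted in a single table-driven pass over integer bits.
import Mathlib
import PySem

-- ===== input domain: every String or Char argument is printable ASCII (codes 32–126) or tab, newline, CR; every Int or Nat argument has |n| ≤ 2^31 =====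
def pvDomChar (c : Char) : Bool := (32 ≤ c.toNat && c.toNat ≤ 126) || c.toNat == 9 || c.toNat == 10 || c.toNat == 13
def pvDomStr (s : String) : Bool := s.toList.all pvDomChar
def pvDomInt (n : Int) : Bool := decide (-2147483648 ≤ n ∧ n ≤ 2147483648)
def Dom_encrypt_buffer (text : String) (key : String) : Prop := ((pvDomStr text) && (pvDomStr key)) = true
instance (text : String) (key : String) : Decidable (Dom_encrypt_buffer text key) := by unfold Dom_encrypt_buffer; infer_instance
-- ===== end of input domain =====

-- B drops A's '0'/'1'-string machinery entirely: the 16 identical XOR rounds collapse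
-- over GF(2), so IP + network + FP are fused into one precomputed 64-entry index table
-- and each block is one table-driven pass over integer bits.

-- ===== PORT A =====

def pvIP : List Nat :=
  [58,50,42,34,26,18,10,2, 60,52,44,36,28,20,12,4,
   62,54,46,38,30,22,14,6, 64,56,48,40,32,24,16,8,
   57,49,41,33,25,17,9,1,  59,51,43,35,27,19,11,3,
   61,53,45,37,29,21,13,5, 63,55,47,39,31,23,15,7]

def pvFP : List Nat :=
  [40,8,48,16,56,24,64,32, 39,7,47,15,55,23,63,31,
   38,6,46,14,54,22,62,30, 37,5,45,13,53,21,61,29,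
   36,4,44,12,52,20,60,28, 35,3,43,11,51,19,59,27,
   34,2,42,10,50,18,58,26, 33,1,41,9,49,17,57,25]

-- format(ord(c), '08b'): 8-bit MSB-first binary; exact for code points < 256 (Dom gives ≤ 126)
def pvCharBits (c : Char) : List Char :=
  (List.range 8).map (fun i => if Nat.testBit c.toNat (7 - i) then '1' else '0')

def pvTextToBits (t : List Char) : List Char := t.flatMap pvCharBits

-- int(s, 2): exact when s is a nonempty string of '0'/'1' digits (always the case at its call site)
def pvBitsVal (l : List Char) : Nat :=
  l.foldl (fun a c => 2 * a + (if c = '1' then 1 else 0)) 0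

-- bits_to_text: chr(int(bits[i:i+8],2)) for each 8-char chunk (the last chunk may be short)
def pvBitsToText : List Char → List Char
  | [] => []
  | c1 :: c2 :: c3 :: c4 :: c5 :: c6 :: c7 :: c8 :: rest =>
      Char.ofNat (pvBitsVal [c1, c2, c3, c4, c5, c6, c7, c8]) :: pvBitsToText rest
  | l => [Char.ofNat (pvBitsVal l)]

def pvCxor (a b : Char) : Char := if a = b then '0' else '1'

def pvXor (a b : List Char) : List Char := List.zipWith pvCxor a b

-- while len(text) % 8 != 0: text += ' '  — the loop appends (8 - len % 8) % 8 spaces, one per step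
def pvPadAux : Nat → List Char → List Char
  | 0, t => t
  | n + 1, t => pvPadAux n (t ++ [' '])

def pvPadText (t : List Char) : List Char := pvPadAux ((8 - t.length % 8) % 8) t

def pvSimpleRoundFunc (block key_bits : List Char) : List Char :=
  pvXor block (key_bits.take block.length)

-- ''.join(l[i-1] for i in tbl); getD is exact here: Python raises IndexError only when the
-- key is empty (excluded by Pre_), on every other admitted input all indices are in range
def pvPermute (l : List Char) (tbl : List Nat) : List Char :=
  tbl.map (fun i => l.getD (i - 1) ' ')

-- the 16-round loop: left,right = right, xor(left, simple_round_func(right, key_bits))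
def pvRounds : Nat → List Char → List Char → List Char → (List Char × List Char)
  | 0, left, right, _ => (left, right)
  | n + 1, left, right, key_bits =>
      pvRounds n right (pvXor left (pvSimpleRoundFunc right key_bits)) key_bits

def pvDesEncryptBlock (block_bits key_bits : List Char) : List Char :=
  let bb := pvPermute block_bits pvIP
  let lr := pvRounds 16 (bb.take 32) (bb.drop 32) key_bits
  pvPermute (lr.2 ++ lr.1) pvFP

def pvEncBlocksA : List Char → List Char → List Char
  | [], _ => []
  | c1 :: c2 :: c3 :: c4 :: c5 :: c6 :: c7 :: c8 :: rest, key_bits =>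
      pvBitsToText (pvDesEncryptBlock (pvTextToBits [c1, c2, c3, c4, c5, c6, c7, c8]) key_bits)
        ++ pvEncBlocksA rest key_bits
  | l, key_bits => pvBitsToText (pvDesEncryptBlock (pvTextToBits l) key_bits)

def encrypt_buffer (text : String) (key : String) : String :=
  let t := pvPadText text.toList
  let key_bits := pvTextToBits ((pvPadText key.toList).take 8)
  String.ofList (pvEncBlocksA t key_bits)

-- ===== PORT B =====

-- [(ord(c) >> (7 - b)) & 1 for b in range(8)]
def pvCharBitsN (c : Char) : List Nat :=
  (List.range 8).map (fun b => (c.toNat >>> (7 - b)) &&& 1)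

-- v = 0; for b in bits: v = 2 * v + b
def pvPackVal (l : List Nat) : Nat := l.foldl (fun v b => 2 * v + b) 0

-- _pack: if not bits: "" else chr(value of bits[:8]) + _pack(bits[8:])
def pvPack (l : List Nat) : List Char :=
  if h : l = [] then []
  else Char.ofNat (pvPackVal (l.take 8)) :: pvPack (l.drop 8)
  termination_by l.length
  decreasing_by
    have : l.length ≠ 0 := fun h0 => h (List.eq_nil_of_length_eq_zero h0)
    simp only [List.length_drop]; omega

-- the fused table: for f in FP: p = f-1; (IP[p]-1, (IP[p+32]-1, p)) if p < 32 else (IP[p]-1, None)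
def pvTable : List (Nat × Option (Nat × Nat)) :=
  pvFP.map (fun f =>
    let p := f - 1
    if p < 32 then (pvIP.getD p 0 - 1, some (pvIP.getD (p + 32) 0 - 1, p))
    else (pvIP.getD p 0 - 1, none))

-- [bits[i1] if rest is None else bits[i1] ^ bits[rest[0]] ^ kbits[rest[1]] for (i1, rest) in tbl]
-- getD is exact: within Pre_ every index is in range (IndexError only for empty key, excluded)
def pvEncBlock (bits kbits : List Nat) : List Nat :=
  pvTable.map (fun e =>
    match e.2 with
    | none => bits.getD e.1 0
    | some (i2, kp) => bits.getD e.1 0 ^^^ bits.getD i2 0 ^^^ kbits.getD kp 0)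

-- while text: block, text = text[:8], text[8:]; ...
def pvBlocksB (t : List Char) (kbits : List Nat) : List Char :=
  if h : t = [] then []
  else pvPack (pvEncBlock ((t.take 8).flatMap pvCharBitsN) kbits) ++ pvBlocksB (t.drop 8) kbits
  termination_by t.length
  decreasing_by
    have : t.length ≠ 0 := fun h0 => h (List.eq_nil_of_length_eq_zero h0)
    simp only [List.length_drop]; omega

def encrypt_buffer_alt (text : String) (key : String) : String :=
  let t := text.toList ++ List.replicate ((8 - text.toList.length % 8) % 8) ' '
  let k := (key.toList ++ List.replicate ((8 - key.toList.length % 8) % 8) ' ').take 8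
  String.ofList (pvBlocksB t (k.flatMap pvCharBitsN))

-- ===== PRECONDITION & SPEC =====
-- Pre_ excludes the inputs where the Python A raises IndexError: a nonempty text with an
-- empty key (the key bits are then empty, so the final permutation indexes past the end;
-- the Python B raises there too).
def Pre_encrypt_buffer (text : String) (key : String) : Prop := text = "" ∨ key ≠ ""
instance (text : String) (key : String) : Decidable (Pre_encrypt_buffer text key) := by
  unfold Pre_encrypt_buffer; infer_instance

def pvWitness_encrypt_buffer : String × String := ("Hi", "k")

def Spec_encrypt_buffer (text : String) (key : String) (out : String) : Prop := out = encrypt_buffer_alt text key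
instance (text : String) (key : String) (out : String) : Decidable (Spec_encrypt_buffer text key out) := by unfold Spec_encrypt_buffer; infer_instance

-- ===== CLAIM (what is proved, stated in full; the proofs are below) =====
def Claim_equal_encrypt_buffer : Prop := ∀ (text : String) (key : String), Dom_encrypt_buffer text key → Pre_encrypt_buffer text key → Spec_encrypt_buffer text key (encrypt_buffer text key)

-- ===== LEMMAS AND PROOFS =====

-- embedding of B's integer bits into A's bit characters
def pvN2C (n : Nat) : Char := if n = 1 then '1' else '0'

def pvB01 (l : List Nat) : Prop := ∀ x ∈ l, x = 0 ∨ x = 1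

def pvIsBit (c : Char) : Prop := c = '0' ∨ c = '1'

-- char-level image of one Feistel round, iterated
def pvRoundsC : Nat → Char → Char → Char → (Char × Char)
  | 0, a, b, _ => (a, b)
  | n + 1, a, b, c => pvRoundsC n b (pvCxor a (pvCxor b c)) c

theorem pvRounds_nil (n : Nat) (k : List Char) : pvRounds n [] [] k = ([], []) := by
  induction n with
  | zero => rfl
  | succ n ih => simpa [pvRounds, pvXor, pvSimpleRoundFunc] using ih

theorem pvRounds_cons (n : Nat) (a b c : Char) (l r k : List Char) :
    pvRounds n (a :: l) (b :: r) (c :: k) =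
      ((pvRoundsC n a b c).1 :: (pvRounds n l r k).1,
       (pvRoundsC n a b c).2 :: (pvRounds n l r k).2) := by
  induction n generalizing a b c l r k with
  | zero => rfl
  | succ n ih =>
      simp only [pvRounds, pvRoundsC, pvSimpleRoundFunc, pvXor, List.length_cons,
        List.take_succ_cons, List.zipWith_cons_cons]
      exact ih _ _ _ _ _ _

theorem pvRoundsC_16 (a b c : Char) (ha : pvIsBit a) (hb : pvIsBit b) (hc : pvIsBit c) :
    pvRoundsC 16 a b c = (b, pvCxor (pvCxor a b) c) := by
  rcases ha with rfl | rfl <;> rcases hb with rfl | rfl <;> rcases hc with rfl | rfl <;> decide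

theorem pvRounds16_closed (l r k : List Char) (hlen : l.length = r.length)
    (hrk : r.length ≤ k.length)
    (hl : ∀ c ∈ l, pvIsBit c) (hr : ∀ c ∈ r, pvIsBit c) (hk : ∀ c ∈ k, pvIsBit c) :
    pvRounds 16 l r k = (r, pvXor (pvXor l r) k) := by
  induction l generalizing r k with
  | nil =>
      cases r with
      | nil => simp [pvRounds_nil, pvXor]
      | cons b r' => simp at hlen
  | cons a l' ih =>
      cases r with
      | nil => simp at hlen
      | cons b r' =>
          cases k with
          | nil => simp at hrk
          | cons c k' =>
              rw [pvRounds_cons,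
                pvRoundsC_16 a b c (hl a (by simp)) (hr b (by simp)) (hk c (by simp)),
                ih r' k' (by simpa using hlen) (by simpa using hrk)
                  (fun x hx => hl x (by simp [hx])) (fun x hx => hr x (by simp [hx]))
                  (fun x hx => hk x (by simp [hx]))]
              simp [pvXor]

theorem pvN2C_isBit (n : Nat) : pvIsBit (pvN2C n) := by
  unfold pvN2C pvIsBit; split_ifs <;> simp

theorem pvCharBitsN_01 (c : Char) : pvB01 (pvCharBitsN c) := by
  intro x hx
  simp only [pvCharBitsN, List.mem_map] at hx
  obtain ⟨i, _, rfl⟩ := hx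
  rw [Nat.and_one_is_mod]
  omega

theorem pvCharBits_map (c : Char) : pvCharBits c = (pvCharBitsN c).map pvN2C := by
  unfold pvCharBits pvCharBitsN
  rw [List.map_map]
  apply List.map_congr_left
  intro i _
  show (if Nat.testBit c.toNat (7 - i) then '1' else '0') = pvN2C ((c.toNat >>> (7 - i)) &&& 1)
  rw [Nat.and_one_is_mod, Nat.shiftRight_eq_div_pow, Nat.testBit_eq_decide_div_mod_eq]
  unfold pvN2C
  by_cases h : c.toNat / 2 ^ (7 - i) % 2 = 1 <;> simp [h]

theorem pvTextToBits_map (t : List Char) :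
    pvTextToBits t = (t.flatMap pvCharBitsN).map pvN2C := by
  simp only [pvTextToBits, List.map_flatMap]
  exact List.flatMap_congr (fun c _ => pvCharBits_map c)

theorem pvFlatMapBitsN_01 (t : List Char) : pvB01 (t.flatMap pvCharBitsN) := by
  intro x hx
  simp only [List.mem_flatMap] at hx
  obtain ⟨c, _, hc⟩ := hx
  exact pvCharBitsN_01 c x hc

theorem pvBitsVal_map (l : List Nat) (h01 : pvB01 l) :
    pvBitsVal (l.map pvN2C) = pvPackVal l := by
  unfold pvBitsVal pvPackVal
  rw [List.foldl_map]
  apply PySem.List.foldl_congr_mem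
  intro a x hx
  rcases h01 x hx with rfl | rfl <;> simp [pvN2C]

theorem pvBitsToText_chunk (l : List Char) (h : l ≠ []) :
    pvBitsToText l = Char.ofNat (pvBitsVal (l.take 8)) :: pvBitsToText (l.drop 8) := by
  rcases l with _ | ⟨a1, l⟩; · exact (h rfl).elim
  rcases l with _ | ⟨a2, l⟩; · simp [pvBitsToText]
  rcases l with _ | ⟨a3, l⟩; · simp [pvBitsToText]
  rcases l with _ | ⟨a4, l⟩; · simp [pvBitsToText]
  rcases l with _ | ⟨a5, l⟩; · simp [pvBitsToText]
  rcases l with _ | ⟨a6, l⟩; · simp [pvBitsToText]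
  rcases l with _ | ⟨a7, l⟩; · simp [pvBitsToText]
  rcases l with _ | ⟨a8, l⟩; · simp [pvBitsToText]
  simp [pvBitsToText]

theorem pvPack_map (l : List Nat) (h01 : pvB01 l) :
    pvBitsToText (l.map pvN2C) = pvPack l := by
  induction l using pvPack.induct with
  | case1 => rw [pvPack]; simp [pvBitsToText]
  | case2 l h ih =>
      rw [pvBitsToText_chunk _ (by simpa using h), pvPack, dif_neg h,
        ← List.map_take, ← List.map_drop,
        pvBitsVal_map _ (fun x hx => h01 x (List.mem_of_mem_take hx)),
        ih (fun x hx => h01 x (List.mem_of_mem_drop hx))]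

theorem pvGetD_map_n2c (l : List Nat) (n : Nat) (hn : n < l.length) :
    (l.map pvN2C).getD n ' ' = pvN2C (l.getD n 0) := by
  rw [List.getD_eq_getElem _ _ (by simpa using hn), List.getD_eq_getElem _ _ hn,
    List.getElem_map]

theorem pvXor_map (a b : List Nat) (ha : pvB01 a) (hb : pvB01 b) :
    pvXor (a.map pvN2C) (b.map pvN2C) = (List.zipWith (· ^^^ ·) a b).map pvN2C := by
  induction a generalizing b with
  | nil => simp [pvXor]
  | cons x a' ih =>
      cases b with
      | nil => simp [pvXor]
      | cons y b' =>
          simp only [List.map_cons, pvXor, List.zipWith_cons_cons] at *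
          congr 1
          · rcases ha x (by simp) with rfl | rfl <;>
              rcases hb y (by simp) with rfl | rfl <;> decide
          · exact ih b' (fun z hz => ha z (List.mem_cons_of_mem _ hz))
              (fun z hz => hb z (List.mem_cons_of_mem _ hz))

theorem pvZipXor_01 (a b : List Nat) (ha : pvB01 a) (hb : pvB01 b) :
    pvB01 (List.zipWith (· ^^^ ·) a b) := by
  intro x hx
  rw [List.mem_iff_getElem] at hx
  obtain ⟨i, hi, rfl⟩ := hx
  have hi' : i < a.length ∧ i < b.length := by
    rw [List.length_zipWith] at hi; omega
  rw [List.getElem_zipWith]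
  rcases ha _ (List.getElem_mem hi'.1) with h1 | h1 <;>
    rcases hb _ (List.getElem_mem hi'.2) with h2 | h2 <;> rw [h1, h2] <;> simp

theorem pvGetD01 (l : List Nat) (h01 : pvB01 l) (n : Nat) : l.getD n 0 = 0 ∨ l.getD n 0 = 1 := by
  rcases Nat.lt_or_ge n l.length with h | h
  · rw [List.getD_eq_getElem _ _ h]; exact h01 _ (List.getElem_mem h)
  · rw [List.getD_eq_default _ _ h]; left; rfl

-- the fused per-bit index computation agrees with IP → closed-form network → FP
theorem pvPreN_getD (bN kN : List Nat) (hklen : 32 ≤ kN.length)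
    (f : Nat) (hf : 1 ≤ f ∧ f ≤ 64) :
    (List.zipWith (· ^^^ ·)
        (List.zipWith (· ^^^ ·) ((pvIP.map (fun i => bN.getD (i - 1) 0)).take 32)
          ((pvIP.map (fun i => bN.getD (i - 1) 0)).drop 32)) kN
      ++ (pvIP.map (fun i => bN.getD (i - 1) 0)).drop 32).getD (f - 1) 0 =
    (if f - 1 < 32 then
        bN.getD (pvIP.getD (f - 1) 0 - 1) 0 ^^^ bN.getD (pvIP.getD (f - 1 + 32) 0 - 1) 0
          ^^^ kN.getD (f - 1) 0
      else bN.getD (pvIP.getD (f - 1) 0 - 1) 0) := by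
  have hIPlen : pvIP.length = 64 := by decide
  set bbN := pvIP.map (fun i => bN.getD (i - 1) 0) with hbbN
  have hbb : bbN.length = 64 := by simp [hbbN, hIPlen]
  have hz1 : (List.zipWith (· ^^^ ·) (bbN.take 32) (bbN.drop 32)).length = 32 := by
    simp [hbb]
  have hz2 : (List.zipWith (· ^^^ ·)
      (List.zipWith (· ^^^ ·) (bbN.take 32) (bbN.drop 32)) kN).length = 32 := by
    simp [hz1]; omega
  have hbbGet : ∀ q, q < 64 → bbN.getD q 0 = bN.getD (pvIP.getD q 0 - 1) 0 := by
    intro q hq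
    have hq' : q < bbN.length := by omega
    rw [List.getD_eq_getElem _ _ hq']
    simp only [hbbN, List.getElem_map]
    rw [List.getD_eq_getElem pvIP 0 (by rw [hIPlen]; omega)]
  by_cases hp : f - 1 < 32
  · rw [if_pos hp,
      List.getD_eq_getElem _ _ (by simp [hz2, hbb]; omega),
      List.getElem_append_left (by omega),
      List.getElem_zipWith, List.getElem_zipWith, List.getElem_take, List.getElem_drop]
    rw [← List.getD_eq_getElem bbN 0 (by omega),
      ← List.getD_eq_getElem bbN 0 (by omega),
      ← List.getD_eq_getElem kN 0 (by omega),
      hbbGet _ (by omega), hbbGet _ (by omega),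
      Nat.add_comm 32 (f - 1)]
  · rw [if_neg hp,
      List.getD_eq_getElem _ _ (by simp [hz2, hbb]; omega),
      List.getElem_append_right (by rw [hz2]; omega),
      List.getElem_drop,
      ← List.getD_eq_getElem bbN 0 (by rw [hbb]; omega), hz2,
      hbbGet _ (by omega),
      show 32 + (f - 1 - 32) = f - 1 by omega]

theorem pvBlock_eq (bN kN : List Nat) (hb : pvB01 bN) (hblen : bN.length = 64)
    (hk : pvB01 kN) (hklen : 32 ≤ kN.length) :
    pvDesEncryptBlock (bN.map pvN2C) (kN.map pvN2C) = (pvEncBlock bN kN).map pvN2C := by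
  have hIPlen : pvIP.length = 64 := by decide
  have hIPrange : ∀ i ∈ pvIP, 1 ≤ i ∧ i ≤ 64 := by decide
  have hFPrange : ∀ f ∈ pvFP, 1 ≤ f ∧ f ≤ 64 := by decide
  set bbN := pvIP.map (fun i => bN.getD (i - 1) 0) with hbbN
  have hbb : bbN.length = 64 := by simp [hbbN, hIPlen]
  have hbb01 : pvB01 bbN := by
    intro x hx
    simp only [hbbN, List.mem_map] at hx
    obtain ⟨i, _, rfl⟩ := hx
    exact pvGetD01 bN hb _
  -- step 1: the IP pass commutes with the embedding
  have hperm : pvPermute (bN.map pvN2C) pvIP = bbN.map pvN2C := by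
    unfold pvPermute
    rw [hbbN, List.map_map]
    apply List.map_congr_left
    intro i hi
    exact pvGetD_map_n2c bN (i - 1) (by have := hIPrange i hi; omega)
  simp only [pvDesEncryptBlock]
  rw [hperm]
  -- step 2: collapse the 16 rounds
  rw [← List.map_take, ← List.map_drop]
  rw [pvRounds16_closed ((bbN.take 32).map pvN2C) ((bbN.drop 32).map pvN2C) (kN.map pvN2C)
      (by simp [hbb]) (by simp [hbb]; omega)
      (by intro c hc; simp only [List.mem_map] at hc; obtain ⟨x, _, rfl⟩ := hc; exact pvN2C_isBit x)
      (by intro c hc; simp only [List.mem_map] at hc; obtain ⟨x, _, rfl⟩ := hc; exact pvN2C_isBit x)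
      (by intro c hc; simp only [List.mem_map] at hc; obtain ⟨x, _, rfl⟩ := hc; exact pvN2C_isBit x)]
  -- step 3: push the embedding through xor and append
  have hT01 : pvB01 (bbN.take 32) := fun x hx => hbb01 x (List.mem_of_mem_take hx)
  have hD01 : pvB01 (bbN.drop 32) := fun x hx => hbb01 x (List.mem_of_mem_drop hx)
  rw [pvXor_map _ _ hT01 hD01, pvXor_map _ _ (pvZipXor_01 _ _ hT01 hD01) hk,
    ← List.map_append]
  -- step 4: the FP pass against the fused table
  simp only [pvPermute, pvEncBlock, pvTable, List.map_map]
  apply List.map_congr_left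
  intro f hf
  have hfr := hFPrange f hf
  have hlen : (List.zipWith (· ^^^ ·)
      (List.zipWith (· ^^^ ·) (bbN.take 32) (bbN.drop 32)) kN
      ++ bbN.drop 32).length = 64 := by
    simp [hbb]; omega
  dsimp only [Function.comp]
  rw [pvGetD_map_n2c _ _ (by rw [hlen]; omega)]
  rw [pvPreN_getD bN kN hklen f hfr]
  by_cases hp : f - 1 < 32 <;> simp [hp]

theorem pvEncBlock_01 (bits kbits : List Nat) (hb : pvB01 bits) (hk : pvB01 kbits) :
    pvB01 (pvEncBlock bits kbits) := by
  intro x hx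
  simp only [pvEncBlock, List.mem_map] at hx
  obtain ⟨e, _, rfl⟩ := hx
  rcases e with ⟨i1, _ | ⟨i2, kp⟩⟩
  · exact pvGetD01 bits hb i1
  · dsimp only
    rcases pvGetD01 bits hb i1 with h1 | h1 <;>
      rcases pvGetD01 bits hb i2 with h2 | h2 <;>
        rcases pvGetD01 kbits hk kp with h3 | h3 <;>
          rw [h1, h2, h3] <;> simp

theorem pvBlocks_eq (t : List Char) (kN : List Nat) (hmod : t.length % 8 = 0)
    (hk : pvB01 kN) (hklen : 32 ≤ kN.length) :
    pvEncBlocksA t (kN.map pvN2C) = pvBlocksB t kN := by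
  have H : ∀ (t : List Char) (kc : List Char), kc = kN.map pvN2C →
      t.length % 8 = 0 → pvEncBlocksA t kc = pvBlocksB t kN := by
    intro t kc
    induction t, kc using pvEncBlocksA.induct with
    | case1 => intro _ _; rw [pvBlocksB]; rfl
    | case2 c1 c2 c3 c4 c5 c6 c7 c8 rest kb ih =>
        intro hkc hmod2
        subst hkc
        have hmod' : rest.length % 8 = 0 := by
          simp only [List.length_cons] at hmod2; omega
        have hb01 := pvFlatMapBitsN_01 [c1, c2, c3, c4, c5, c6, c7, c8]
        have hblen : ([c1, c2, c3, c4, c5, c6, c7, c8].flatMap pvCharBitsN).length = 64 := by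
          simp [pvCharBitsN]
        conv_rhs => rw [pvBlocksB]
        rw [pvEncBlocksA, pvTextToBits_map,
          pvBlock_eq _ kN hb01 hblen hk hklen,
          pvPack_map _ (pvEncBlock_01 _ _ hb01 hk),
          ih rfl hmod']
        simp
    | case3 l kb hnil hcons =>
        intro _ hmod2
        exfalso
        have hlt : l.length < 8 := by
          rcases l with _ | ⟨a1, l⟩; · exact (hnil rfl).elim
          rcases l with _ | ⟨a2, l⟩; · simp
          rcases l with _ | ⟨a3, l⟩; · simp
          rcases l with _ | ⟨a4, l⟩; · simp
          rcases l with _ | ⟨a5, l⟩; · simp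
          rcases l with _ | ⟨a6, l⟩; · simp
          rcases l with _ | ⟨a7, l⟩; · simp
          rcases l with _ | ⟨a8, l⟩; · simp
          exact (hcons _ _ _ _ _ _ _ _ _ rfl).elim
        have hpos : l.length ≠ 0 := fun h => hnil (List.eq_nil_of_length_eq_zero h)
        omega
  exact H t _ rfl hmod

theorem pvPadAux_eq (n : Nat) (t : List Char) :
    pvPadAux n t = t ++ List.replicate n ' ' := by
  induction n generalizing t with
  | zero => simp [pvPadAux]
  | succ n ih =>
      rw [pvPadAux, ih]
      simp [List.replicate_succ]

theorem pvPadText_eq (t : List Char) :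
    pvPadText t = t ++ List.replicate ((8 - t.length % 8) % 8) ' ' := pvPadAux_eq _ _

theorem pvPadText_mod (t : List Char) : (pvPadText t).length % 8 = 0 := by
  rw [pvPadText_eq]; simp; omega

-- ===== VERDICT (by name: the statement is the Claim_ definition above) =====
theorem encrypt_buffer_spec : Claim_equal_encrypt_buffer := by
  intro text key _ hpre
  unfold Spec_encrypt_buffer encrypt_buffer encrypt_buffer_alt
  dsimp only
  rw [← pvPadText_eq, ← pvPadText_eq]
  rcases hpre with rfl | hkey
  · rw [pvBlocksB]; rfl
  · have hknil : key.toList ≠ [] := by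
      intro h
      have hk2 : key = String.ofList key.toList := String.ofList_toList.symm
      rw [h] at hk2
      exact hkey hk2
    have hpadlen : 8 ≤ (pvPadText key.toList).length := by
      rw [pvPadText_eq, List.length_append, List.length_replicate]
      have h3 : 1 ≤ key.toList.length := by
        cases h : key.toList with
        | nil => exact absurd h hknil
        | cons a l => simp
      omega
    have hklen : 32 ≤ (((pvPadText key.toList).take 8).flatMap pvCharBitsN).length := by
      rw [List.length_flatMap]
      simp [pvCharBitsN]
      omega
    rw [pvTextToBits_map,
      pvBlocks_eq _ _ (pvPadText_mod text.toList) (pvFlatMapBitsN_01 _) hklen]
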